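-- pv_equiv track=rewrite | github.com/tonybjorkman/advent-of-code-2023 | day7/day7.py | translate_cards_to_digit
-- ===== SOURCE A (Python) =====
-- def translate_cards_to_digit(cards):
--     card_dict = {'T': 10, 'J': 11, 'Q': 12, 'K': 13, 'A': 14}
--     translation = []
--     for card in cards:
--         if card in card_dict:
--             translation.append(card_dict[card])
--         else:
--             translation.append(int(card))
--     translation.sort()
--     return translation
-- ===== SOURCE B (Python) =====
-- def translate_cards_to_digit(cards):
--     card_dict = {'T': 10, 'J': 11, 'Q': 12, 'K': 13, 'A': 14}
--     counts = [0] * 15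
--     for card in cards:
--         value = card_dict[card] if card in card_dict else int(card)
--         counts[value] += 1
--     out = []
--     for value in range(15):
--         out.extend([value] * counts[value])
--     return out
-- ===== Notes on version B (the rewrite author's own statement) =====
-- stated objective: alternative
-- what changed: Replaces append-then-comparison-sort with a single counting pass into a 15-bucket table, rebuilding the sorted result from the buckets (counting sort); invalid characters raise ValueError in both.
import Mathlib
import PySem

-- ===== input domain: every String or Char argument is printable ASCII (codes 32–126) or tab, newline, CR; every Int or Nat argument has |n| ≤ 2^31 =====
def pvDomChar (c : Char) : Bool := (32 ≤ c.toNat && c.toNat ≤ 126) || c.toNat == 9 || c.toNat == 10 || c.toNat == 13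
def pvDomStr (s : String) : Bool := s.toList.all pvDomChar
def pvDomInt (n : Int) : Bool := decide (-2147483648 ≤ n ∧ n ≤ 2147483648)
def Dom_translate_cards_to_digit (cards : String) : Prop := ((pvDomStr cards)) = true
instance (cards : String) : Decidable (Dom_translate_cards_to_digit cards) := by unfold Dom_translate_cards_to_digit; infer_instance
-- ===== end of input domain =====

-- B replaces append-then-sort with a counting pass into 15 buckets and rebuilds the
-- sorted result from the buckets (counting sort); same per-char dict-or-int(card)
-- derivation, so the same inputs raise ValueError (excluded by Pre_).

-- ===== PORT A =====
-- shared by both ports: both Pythons compute the value of one card with the identical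
-- expression "card_dict[card] if card in card_dict else int(card)"
def pvCardDict : PySem.Dict Char Int :=
  (((((PySem.Dict.empty).insert 'T' 10).insert 'J' 11).insert 'Q' 12).insert 'K' 13).insert 'A' 14

def pvCharVal (c : Char) : Int :=
  match pvCardDict.get? c with
  | some v => v
  | none => (PySem.Int.ofStr? (String.ofList [c])).getD 0  -- int(card); getD unreachable under Pre_

def translate_cards_to_digit (cards : String) : List Int :=
  let translation := cards.toList.foldl (fun acc c => acc ++ [pvCharVal c]) []
  PySem.List.sorted translation (fun x => x) false

-- ===== PORT B =====
def translate_cards_to_digit_alt (cards : String) : List Int :=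
  let counts := cards.toList.foldl
    (fun cnts c => cnts.set (pvCharVal c).toNat (cnts.getD (pvCharVal c).toNat 0 + 1))
    (List.replicate 15 (0 : Nat))
  (PySem.List.pyRange 0 15 1).foldl
    (fun out v => out ++ List.replicate (counts.getD v.toNat 0) v) []

-- ===== PRECONDITION & SPEC =====
def pvAllowed : List Char := ['0','1','2','3','4','5','6','7','8','9','T','J','Q','K','A']

-- Pre_ excludes exactly the inputs where A raises ValueError (int(card) on a char that
-- is neither a decimal digit nor a key of card_dict); B raises there too.
def Pre_translate_cards_to_digit (cards : String) : Prop :=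
  cards.toList.all (fun c => pvAllowed.contains c) = true
instance (cards : String) : Decidable (Pre_translate_cards_to_digit cards) := by
  unfold Pre_translate_cards_to_digit; infer_instance

def pvWitness_translate_cards_to_digit : String := "A23TK7"

def Spec_translate_cards_to_digit (cards : String) (out : List Int) : Prop := out = translate_cards_to_digit_alt cards
instance (cards : String) (out : List Int) : Decidable (Spec_translate_cards_to_digit cards out) := by unfold Spec_translate_cards_to_digit; infer_instance

-- ===== CLAIM (what is proved, stated in full; the proofs are below) =====
def Claim_equal_translate_cards_to_digit : Prop := ∀ (cards : String), Dom_translate_cards_to_digit cards → Pre_translate_cards_to_digit cards → Spec_translate_cards_to_digit cards (translate_cards_to_digit cards)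

-- ===== LEMMAS AND PROOFS =====

lemma pvCharVal_bounds : ∀ c ∈ pvAllowed, 0 ≤ pvCharVal c ∧ pvCharVal c < 15 := by
  intro c hc
  fin_cases hc <;> exact ⟨by decide, by decide⟩

lemma pvCounts_spec (cl : List Char) (init : List Nat) (i : Nat) (hi : i < init.length)
    (hall : ∀ c ∈ cl, (pvCharVal c).toNat < init.length) :
    (cl.foldl (fun cnts c => cnts.set (pvCharVal c).toNat (cnts.getD (pvCharVal c).toNat 0 + 1)) init).getD i 0
      = init.getD i 0 + cl.countP (fun c => (pvCharVal c).toNat == i) := by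
  induction cl generalizing init with
  | nil => simp
  | cons c t ih =>
    have hc : (pvCharVal c).toNat < init.length := hall c (by simp)
    rw [List.foldl_cons, ih _ (by simpa using hi) (by intro x hx; simpa using hall x (by simp [hx]))]
    rw [List.countP_cons]
    by_cases h : (pvCharVal c).toNat = i
    · subst h
      simp [List.getD_eq_getElem?_getD, hc, Nat.add_comm, Nat.add_assoc]
      omega
    · simp [List.getD_eq_getElem?_getD, List.getElem?_set_ne h, h]

lemma pvPairwise_flatMap_replicate (vs : List Int) (f : Int → Nat) (h : vs.Pairwise (· ≤ ·)) :
    (vs.flatMap (fun v => List.replicate (f v) v)).Pairwise (· ≤ ·) := by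
  induction vs with
  | nil => simp
  | cons v t ih =>
    rw [List.flatMap_cons, List.pairwise_append]
    refine ⟨List.pairwise_replicate.2 (by simp), ih h.tail, ?_⟩
    intro a ha b hb
    obtain ⟨w, hw, hbw⟩ := List.mem_flatMap.1 hb
    have hav := List.eq_of_mem_replicate ha
    have hbv := List.eq_of_mem_replicate hbw
    subst hav; subst hbv
    exact List.rel_of_pairwise_cons h hw

lemma pvCount_flatMap_replicate (vs : List Int) (f : Int → Nat) (hnd : vs.Nodup) (x : Int) :
    (vs.flatMap (fun v => List.replicate (f v) v)).count x = if x ∈ vs then f x else 0 := by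
  induction vs with
  | nil => simp
  | cons v t ih =>
    have hvt : v ∉ t := (List.nodup_cons.1 hnd).1
    rw [List.flatMap_cons, List.count_append, List.count_replicate, ih (List.nodup_cons.1 hnd).2]
    by_cases h : x = v
    · subst h
      simp [hvt]
    · simp [h, Ne.symm h]

-- the B port, rewritten as a flatMap over the bucket values
lemma pvAlt_eq_flatMap (cards : String) :
    translate_cards_to_digit_alt cards =
      (PySem.List.pyRange 0 15 1).flatMap
        (fun v => List.replicate
          ((cards.toList.foldl
              (fun cnts c => cnts.set (pvCharVal c).toNat (cnts.getD (pvCharVal c).toNat 0 + 1))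
              (List.replicate 15 (0 : Nat))).getD v.toNat 0) v) := by
  unfold translate_cards_to_digit_alt
  simpa using PySem.List.foldl_append_eq_flatMap
    (fun v => List.replicate
      ((cards.toList.foldl
          (fun cnts c => cnts.set (pvCharVal c).toNat (cnts.getD (pvCharVal c).toNat 0 + 1))
          (List.replicate 15 (0 : Nat))).getD v.toNat 0) v)
    (PySem.List.pyRange 0 15 1) []

-- ===== VERDICT (by name: the statement is the Claim_ definition above) =====
theorem translate_cards_to_digit_spec : Claim_equal_translate_cards_to_digit := by
  intro cards _hdom hpre
  unfold Spec_translate_cards_to_digit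
  unfold translate_cards_to_digit
  rw [PySem.List.foldl_append_singleton_eq_map]
  set cl := cards.toList with hcl
  set counts := cl.foldl
      (fun cnts c => cnts.set (pvCharVal c).toNat (cnts.getD (pvCharVal c).toNat 0 + 1))
      (List.replicate 15 (0 : Nat)) with hcounts
  have hb : ∀ c ∈ cl, 0 ≤ pvCharVal c ∧ pvCharVal c < 15 := by
    intro c hc
    refine pvCharVal_bounds c ?_
    have := List.all_eq_true.1 hpre c hc
    simpa using this
  have hcnt : ∀ i : Nat, i < 15 → counts.getD i 0 = cl.countP (fun c => (pvCharVal c).toNat == i) := by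
    intro i hi
    rw [hcounts, pvCounts_spec cl _ i (by simpa) (fun c hc => by
      have := hb c hc; simp; omega)]
    simp only [List.getD_eq_getElem?_getD]
    interval_cases i <;> simp
  have hperm : ((PySem.List.pyRange 0 15 1).flatMap (fun v => List.replicate (counts.getD v.toNat 0) v)).Perm
      (cl.map pvCharVal) := by
    rw [List.perm_iff_count]
    intro x
    rw [pvCount_flatMap_replicate _ _ (PySem.List.nodup_pyRange_one 0 15)]
    simp only [PySem.List.mem_pyRange_one]
    by_cases hx : 0 ≤ x ∧ x < 15
    · rw [if_pos hx, hcnt x.toNat (by omega)]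
      rw [List.count_eq_countP, List.countP_map]
      apply List.countP_congr
      intro c hc
      obtain ⟨h0, _⟩ := hb c hc
      have hiff : (pvCharVal c).toNat = x.toNat ↔ pvCharVal c = x := by omega
      simp [Function.comp, hiff]
    · rw [if_neg hx]
      symm
      rw [List.count_eq_zero]
      intro hmem
      obtain ⟨c, hc, hv⟩ := List.mem_map.1 hmem
      subst hv
      exact hx (hb c hc)
  have hsorted : ((PySem.List.pyRange 0 15 1).flatMap (fun v => List.replicate (counts.getD v.toNat 0) v)).Pairwise (· ≤ ·) :=
    pvPairwise_flatMap_replicate _ _ ((PySem.List.pairwise_lt_pyRange_one 0 15).imp (fun h => le_of_lt h))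
  rw [pvAlt_eq_flatMap]
  exact PySem.List.sorted_id_eq_of_perm_of_pairwise _ _ hperm hsorted
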